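-- pv_equiv track=rewrite | github.com/selalib/selalib | python/maintenance/fortran_module.py | remove_fortran_strings
-- ===== SOURCE A (Python) =====
-- def remove_fortran_strings( text ):
--     """ Remove any fortran string from the given text.
--     """
--     in_string = False
--     delimiter = None
--     new_text  = str()
--     # Construct new text
--     for c in text:
--         # Are we in a string?
--         if in_string:
--             if c == delimiter:
--                 # Recognize that string has finished
--                 in_string = False
--                 delimiter = None
--         else:
--             if c in ['"',"'"]:
--                 # Recognize that new string has just began, and store delimiter
--                 in_string = True
--                 delimiter = c
--             else:
--                 # Add character to new string
--                 new_text += c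
--     # Return new string
--     return new_text
-- ===== SOURCE B (Python) =====
-- def remove_fortran_strings(text):
--     """ Remove any fortran string from the given text.
--     """
--     parts = []
--     rest = text
--     while True:
--         # Chunk-wise: cut at the earlier of the two delimiter kinds
--         d_head, d_sep, d_tail = rest.partition('"')
--         s_head, s_sep, s_tail = rest.partition("'")
--         if len(d_head) <= len(s_head):
--             head, sep, tail = d_head, d_sep, d_tail
--         else:
--             head, sep, tail = s_head, s_sep, s_tail
--         parts.append(head)
--         if not sep:
--             break
--         # Drop the quoted run up to the matching closing delimiter
--         _, closed, rest = tail.partition(sep)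
--         if not closed:
--             break
--     return ''.join(parts)
-- ===== Notes on version B (the rewrite author's own statement) =====
-- stated objective: faster
-- what changed: Replaces the character-by-character in_string/delimiter state machine with chunk-wise scanning: str.partition cuts the text at the earlier delimiter, keeps the prefix, and str.partition again drops the quoted run up to its closing delimiter.
import Mathlib
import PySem

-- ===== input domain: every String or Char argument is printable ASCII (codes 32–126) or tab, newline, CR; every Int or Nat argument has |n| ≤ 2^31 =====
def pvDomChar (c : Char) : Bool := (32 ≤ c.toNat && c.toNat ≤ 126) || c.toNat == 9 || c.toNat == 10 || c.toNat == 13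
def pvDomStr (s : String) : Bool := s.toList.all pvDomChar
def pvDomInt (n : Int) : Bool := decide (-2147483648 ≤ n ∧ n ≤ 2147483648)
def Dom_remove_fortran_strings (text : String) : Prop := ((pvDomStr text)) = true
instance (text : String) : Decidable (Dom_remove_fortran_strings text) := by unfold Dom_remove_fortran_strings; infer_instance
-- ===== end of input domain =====

-- B removes Fortran string literals chunk-wise with str.partition instead of A's per-character state machine (objective: faster by a constant factor, measured).

-- ===== PORT A =====
-- one step of A's loop: state = (in_string, delimiter, new_text)
def aStep (st : Bool × Option Char × List Char) (c : Char) : Bool × Option Char × List Char :=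
  if st.1 then
    if some c = st.2.1 then (false, none, st.2.2) else st
  else
    if c = '"' ∨ c = '\'' then (true, some c, st.2.2)
    else (st.1, st.2.1, st.2.2 ++ [c])

def remove_fortran_strings (text : String) : String :=
  String.ofList (text.toList.foldl aStep (false, none, [])).2.2

-- ===== PORT B =====
-- rest.partition(sep) for a single-character separator (exact: head before first sep, the sep, the tail; (rest,'','') if absent)
def pvPartition (s : List Char) (sep : Char) : List Char × List Char × List Char :=
  match s.dropWhile (· ≠ sep) with
  | [] => (s, [], [])
  | _ :: t => (s.takeWhile (· ≠ sep), [sep], t)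

-- helper lemma needed by altGo's termination proof (cited in decreasing_by)
theorem pvPartition_third_len' (s : List Char) (sep : Char) (h : (pvPartition s sep).2.1 ≠ []) :
    (pvPartition s sep).2.2.length < s.length := by
  unfold pvPartition at h ⊢
  rcases hd : s.dropWhile (fun x => decide (x ≠ sep)) with _ | ⟨x, r⟩ <;> rw [hd] at h
  · simp at h
  · have := (List.dropWhile_sublist (l := s) (p := fun x => decide (x ≠ sep))).length_le
    rw [hd] at this
    simp at this ⊢
    omega

theorem third_len_of_eq (s : List Char) (sep : Char) (head : List Char) (q : Char)
    (t tail : List Char) (h : pvPartition s sep = (head, q :: t, tail)) :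
    tail.length < s.length := by
  have := pvPartition_third_len' s sep (by rw [h]; simp)
  rwa [h] at this

-- B's while-loop as recursion; the accumulated parts become the concatenation
def altGo (rest : List Char) : List Char :=
  match hh : (if (pvPartition rest '"').1.length ≤ (pvPartition rest '\'').1.length
              then pvPartition rest '"' else pvPartition rest '\'') with
  | (head, [], _) => head
  | (head, q :: _, tail) =>
    match hp : pvPartition tail q with
    | (_, [], _) => head
    | (_, _ :: _, rest') => head ++ altGo rest'
termination_by rest.length
decreasing_by
  have h1 : tail.length < rest.length := by
    split at hh <;> exact third_len_of_eq _ _ _ _ _ _ hh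
  have h2 := third_len_of_eq _ _ _ _ _ _ hp
  omega

def remove_fortran_strings_alt (text : String) : String :=
  String.ofList (altGo text.toList)

-- ===== PRECONDITION & SPEC =====
def Spec_remove_fortran_strings (text : String) (out : String) : Prop := out = remove_fortran_strings_alt text
instance (text : String) (out : String) : Decidable (Spec_remove_fortran_strings text out) := by unfold Spec_remove_fortran_strings; infer_instance

-- ===== CLAIM (what is proved, stated in full; the proofs are below) =====
def Claim_equal_remove_fortran_strings : Prop := ∀ (text : String), Dom_remove_fortran_strings text → Spec_remove_fortran_strings text (remove_fortran_strings text)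

-- ===== LEMMAS AND PROOFS =====

def isQ (c : Char) : Bool := c = '"' || c = '\''

-- A's fold while inside a string: skip to the first delimiter, then continue outside
theorem foldl_in_string (l : List Char) (q : Char) (acc : List Char) :
    l.foldl aStep (true, some q, acc) =
      (match l.dropWhile (· ≠ q) with
       | [] => (true, some q, acc)
       | _ :: t => t.foldl aStep (false, none, acc)) := by
  induction l with
  | nil => rfl
  | cons c cs ih =>
    by_cases hc : c = q
    · subst hc
      rw [List.foldl_cons]
      have : aStep (true, some c, acc) c = (false, none, acc) := by simp [aStep]
      rw [this, List.dropWhile_cons_of_neg (by simp)]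
    · rw [List.foldl_cons]
      have : aStep (true, some q, acc) c = (true, some q, acc) := by simp [aStep, hc]
      rw [this, List.dropWhile_cons_of_pos (by simpa using hc), ih]

-- A's fold outside a string over quote-free characters just appends them
theorem foldl_no_quote (l : List Char) (acc : List Char) (h : ∀ c ∈ l, isQ c = false) :
    l.foldl aStep (false, none, acc) = (false, none, acc ++ l) := by
  induction l generalizing acc with
  | nil => simp
  | cons c cs ih =>
    have hc : isQ c = false := h c (by simp)
    have h1 : aStep (false, none, acc) c = (false, none, acc ++ [c]) := by
      simp [aStep, isQ] at hc ⊢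
      tauto
    rw [List.foldl_cons, h1, ih _ (fun d hd => h d (by simp [hd]))]
    simp

theorem pvPartition_cons_eq (cs : List Char) (sep : Char) :
    pvPartition (sep :: cs) sep = ([], [sep], cs) := by
  unfold pvPartition
  rw [List.dropWhile_cons_of_neg (by simp)]
  rw [List.takeWhile_cons_of_neg (by simp)]

theorem pvPartition_cons_ne (c : Char) (cs : List Char) (sep : Char) (h : c ≠ sep) :
    pvPartition (c :: cs) sep =
      (c :: (pvPartition cs sep).1, (pvPartition cs sep).2.1, (pvPartition cs sep).2.2) := by
  unfold pvPartition
  rw [List.dropWhile_cons_of_pos (by simpa using h)]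
  rcases hd : cs.dropWhile (fun x => decide (x ≠ sep)) with _ | ⟨x, r⟩
  · simp
  · rw [List.takeWhile_cons_of_pos (by simpa using h)]

-- the length-min of the two partitions is the cut at the first delimiter of either kind
theorem choose_partition (l : List Char) :
    (if (pvPartition l '"').1.length ≤ (pvPartition l '\'').1.length
     then pvPartition l '"' else pvPartition l '\'') =
      (match l.dropWhile (fun c => !(isQ c)) with
       | [] => (l, [], [])
       | q :: t => (l.takeWhile (fun c => !(isQ c)), [q], t)) := by
  induction l with
  | nil => simp [pvPartition]
  | cons c cs ih =>
    by_cases hd : c = '"'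
    · subst hd
      rw [pvPartition_cons_eq, if_pos (by simp)]
      rw [List.dropWhile_cons_of_neg (by simp [isQ])]
      rw [List.takeWhile_cons_of_neg (by simp [isQ])]
    · by_cases hs : c = '\''
      · subst hs
        rw [pvPartition_cons_eq, pvPartition_cons_ne _ _ _ hd, if_neg (by simp)]
        rw [List.dropWhile_cons_of_neg (by simp [isQ])]
        rw [List.takeWhile_cons_of_neg (by simp [isQ])]
      · rw [pvPartition_cons_ne _ _ _ hd, pvPartition_cons_ne _ _ _ hs]
        rw [List.dropWhile_cons_of_pos (by simp [isQ, hd, hs])]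
        rw [List.takeWhile_cons_of_pos (by simp [isQ, hd, hs])]
        simp only [List.length_cons, Nat.add_le_add_iff_right]
        rcases hdw : cs.dropWhile (fun c => !(isQ c)) with _ | ⟨q, t⟩ <;> rw [hdw] at ih <;>
          split <;> rename_i hcond <;> simp only [hcond, if_true, if_false, ] at ih <;>
            rw [ih]

theorem altGo_eq (l : List Char) :
    altGo l =
      (match l.dropWhile (fun c => !(isQ c)) with
       | [] => l
       | q :: t =>
         match t.dropWhile (· ≠ q) with
         | [] => l.takeWhile (fun c => !(isQ c))
         | _ :: r => l.takeWhile (fun c => !(isQ c)) ++ altGo r) := by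
  rw [altGo.eq_def, choose_partition]
  rcases hdw : l.dropWhile (fun c => !(isQ c)) with _ | ⟨q, t⟩
  · rfl
  · simp only
    unfold pvPartition
    rcases hdq : t.dropWhile (fun x => decide (x ≠ q)) with _ | ⟨x, r⟩ <;> simp

theorem main_lemma : ∀ (n : Nat) (l : List Char) (acc : List Char), l.length ≤ n →
    (l.foldl aStep (false, none, acc)).2.2 = acc ++ altGo l := by
  intro n
  induction n with
  | zero =>
    intro l acc h
    have hl : l = [] := List.eq_nil_of_length_eq_zero (Nat.le_zero.mp h)
    subst hl
    rw [altGo_eq]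
    simp
  | succ n ih =>
    intro l acc hlen
    have hsplit := (List.takeWhile_append_dropWhile (p := fun c => !(isQ c)) (l := l)).symm
    rw [altGo_eq]
    rcases hdw : l.dropWhile (fun c => !(isQ c)) with _ | ⟨q, t⟩
    · rw [hdw] at hsplit
      simp only [List.append_nil] at hsplit
      rw [foldl_no_quote l acc (fun c hc => by
        have hc' : c ∈ l.takeWhile (fun c => !(isQ c)) := by rw [← hsplit]; exact hc
        have := List.mem_takeWhile_imp hc'
        simpa using this)]
    · have hq : isQ q = true := by
        have h0 : 0 < (l.dropWhile (fun c => !(isQ c))).length := by rw [hdw]; simp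
        have := List.dropWhile_get_zero_not (p := fun c => !(isQ c)) l h0
        simp only [List.get_eq_getElem, hdw] at this
        simpa using this
      rw [hdw] at hsplit
      conv_lhs => rw [hsplit, List.foldl_append]
      rw [foldl_no_quote _ acc (fun c hc => by
        have := List.mem_takeWhile_imp (l := l) (p := fun c => !(isQ c)) hc
        simpa using this)]
      have hstep : aStep (false, none, acc ++ l.takeWhile (fun c => !(isQ c))) q
          = (true, some q, acc ++ l.takeWhile (fun c => !(isQ c))) := by
        have : q = '"' ∨ q = '\'' := by
          simp [isQ] at hq; tauto
        simp [aStep, this]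
      rw [List.foldl_cons, hstep, foldl_in_string]
      simp only [ne_eq, decide_not]
      rcases hdq : t.dropWhile (fun x => !decide (x = q)) with _ | ⟨x, r⟩
      · simp
      · have hr : r.length ≤ n := by
          have h1 : (List.dropWhile (fun x => !decide (x = q)) t).length ≤ t.length :=
            List.length_dropWhile_le _ t
          rw [hdq] at h1
          have h2 := congrArg List.length hsplit
          simp only [List.length_append, List.length_cons] at h1 h2
          omega
        rw [ih r _ hr]
        simp

-- ===== VERDICT (by name: the statement is the Claim_ definition above) =====
theorem remove_fortran_strings_spec : Claim_equal_remove_fortran_strings := by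
  intro text _
  unfold Spec_remove_fortran_strings remove_fortran_strings remove_fortran_strings_alt
  rw [main_lemma text.toList.length text.toList [] le_rfl]
  rfl
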